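-- pv_equiv track=rewrite | github.com/lorenax16/Restaurant-Orders | src/analyze_log.py | prato_mas_pedido_maria
-- ===== SOURCE A (Python) =====
-- def prato_mas_pedido_maria(orders):
--     count_order = {}
--     maria_mais_vendidos = [
--         order["order"] for order in orders if order["client"] == "maria"
--     ]
--
--     for v in maria_mais_vendidos:
--         if v in count_order:
--             count_order[v] += 1
--         else:
--             count_order[v] = 1
--
--     return max(count_order, key=count_order.get)
-- ===== SOURCE B (Python) =====
-- def prato_mas_pedido_maria(orders):
--     maria = [order["order"] for order in orders if order["client"] == "maria"]
--     best = None
--     best_count = 0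
--     for dish in maria:
--         c = maria.count(dish)
--         if c > best_count:
--             best, best_count = dish, c
--     if best is None:
--         raise ValueError("no orders by maria")
--     return best
-- ===== Notes on version B (the rewrite author's own statement) =====
-- stated objective: alternative
-- what changed: Replaces A's counting dict plus max(dict, key=get) with a single strict-improvement scan over the maria order list using list.count, so the first-appearing dish with the maximal count wins exactly as max's tie-break does; no dict is built.
import Mathlib
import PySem

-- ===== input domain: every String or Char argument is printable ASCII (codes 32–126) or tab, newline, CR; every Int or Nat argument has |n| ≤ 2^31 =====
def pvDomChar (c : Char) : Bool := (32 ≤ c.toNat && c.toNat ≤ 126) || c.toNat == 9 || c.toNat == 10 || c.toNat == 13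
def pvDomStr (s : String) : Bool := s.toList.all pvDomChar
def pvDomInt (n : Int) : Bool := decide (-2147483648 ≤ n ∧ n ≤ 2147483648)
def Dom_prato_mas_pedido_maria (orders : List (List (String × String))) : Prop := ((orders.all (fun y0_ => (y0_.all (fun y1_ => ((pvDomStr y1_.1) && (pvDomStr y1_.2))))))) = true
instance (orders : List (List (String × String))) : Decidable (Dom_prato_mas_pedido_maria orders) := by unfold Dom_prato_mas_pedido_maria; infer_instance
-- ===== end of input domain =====

-- B replaces A's counting dict + max(dict, key=get) by a single strict-improvement scan over the maria
-- order list using list.count (same first-appearance tie-break); equivalence of the return value is proved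
-- on all inputs where A returns (keys present, at least one maria order).

-- ===== PORT A =====
def prato_mas_pedido_maria (orders : List (List (String × String))) : String :=
  let maria := (orders.filter (fun o => (PySem.Dict.mk o).get? "client" == some "maria")).map
      (fun o => ((PySem.Dict.mk o).get? "order").getD "")   -- KeyError (missing key) is excluded by Pre_
  let count_order := maria.foldl
      (fun d v => if d.contains v then d.insert v (d.getD v 0 + 1) else d.insert v (1 : Int))
      PySem.Dict.empty
  match count_order.keys with
  | [] => ""     -- max() over an empty dict: ValueError, excluded by Pre_
  | k :: ks => ks.foldl (fun best x => if count_order.getD x 0 > count_order.getD best 0 then x else best) k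

-- ===== PORT B =====
def prato_mas_pedido_maria_alt (orders : List (List (String × String))) : String :=
  let maria := (orders.filter (fun o => (PySem.Dict.mk o).get? "client" == some "maria")).map
      (fun o => ((PySem.Dict.mk o).get? "order").getD "")   -- KeyError (missing key) is excluded by Pre_
  let r := maria.foldl
      (fun (acc : Option String × Int) dish =>
        let c : Int := maria.count dish
        if c > acc.2 then (some dish, c) else acc)
      (none, 0)
  r.1.getD ""    -- best is None: Source B raises ValueError, excluded by Pre_

-- ===== PRECONDITION & SPEC =====
-- Pre_ excludes exactly the inputs on which A raises: an order dict missing the "client" key (or a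
-- maria order missing the "order" key) raises KeyError, and no maria order at all makes max() raise ValueError.
def Pre_prato_mas_pedido_maria (orders : List (List (String × String))) : Prop :=
  (∀ o ∈ orders, ((PySem.Dict.mk o).get? "client").isSome = true ∧
      ((PySem.Dict.mk o).get? "client" = some "maria" → ((PySem.Dict.mk o).get? "order").isSome = true)) ∧
  (∃ o ∈ orders, (PySem.Dict.mk o).get? "client" = some "maria")
instance (orders : List (List (String × String))) : Decidable (Pre_prato_mas_pedido_maria orders) := by
  unfold Pre_prato_mas_pedido_maria; infer_instance

def pvWitness_prato_mas_pedido_maria : (List (List (String × String))) :=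
  [[("client", "maria"), ("order", "lasagna")]]

def Spec_prato_mas_pedido_maria (orders : List (List (String × String))) (out : String) : Prop := out = prato_mas_pedido_maria_alt orders
instance (orders : List (List (String × String))) (out : String) : Decidable (Spec_prato_mas_pedido_maria orders out) := by unfold Spec_prato_mas_pedido_maria; infer_instance

-- ===== CLAIM (what is proved, stated in full; the proofs are below) =====
def Claim_equal_prato_mas_pedido_maria : Prop := ∀ (orders : List (List (String × String))), Dom_prato_mas_pedido_maria orders → Pre_prato_mas_pedido_maria orders → Spec_prato_mas_pedido_maria orders (prato_mas_pedido_maria orders)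

-- ===== LEMMAS AND PROOFS =====

-- B's scan: keep (best so far, its count), update on strict improvement.
def pvScan (f : String → Int) (l : List String) (acc : Option String × Int) : Option String × Int :=
  l.foldl (fun acc dish => if f dish > acc.2 then (some dish, f dish) else acc) acc

-- ordered dedup of a list against a 'seen' prefix (the recursion PySem.Set.ofList performs)
def pvDD (s : List String) : List String → List String
  | [] => []
  | x :: xs => if PySem.Set.contains s x then pvDD s xs else x :: pvDD (s ++ [x]) xs

theorem pvOfList_eq_dd (m : List String) : ∀ (s : List String),
    List.foldl PySem.Set.add s m = s ++ pvDD s m := by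
  induction m with
  | nil => intro s; simp [pvDD]
  | cons x xs ih =>
    intro s
    show List.foldl PySem.Set.add (PySem.Set.add s x) xs = s ++ pvDD s (x :: xs)
    by_cases h : PySem.Set.contains s x = true
    · rw [show PySem.Set.add s x = s from by unfold PySem.Set.add; rw [if_pos h], ih s]
      simp only [pvDD, h, if_true]
    · rw [show PySem.Set.add s x = s ++ [x] from by unfold PySem.Set.add; rw [if_neg h], ih (s ++ [x])]
      simp only [pvDD, h, Bool.false_eq_true, if_false]
      simp

theorem pvScan_skip (f : String → Int) (m : List String) :
    ∀ (s : List String) (b : Option String) (c : Int), (∀ x ∈ s, f x ≤ c) →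
    pvScan f m (b, c) = pvScan f (pvDD s m) (b, c) := by
  induction m with
  | nil => intro s b c _; simp [pvDD]
  | cons x xs ih =>
    intro s b c hs
    by_cases h : PySem.Set.contains s x = true
    · have hx : f x ≤ c := hs x (by simpa [PySem.Set.contains] using h)
      have hnot : ¬ f x > c := by omega
      simp only [pvDD, h, if_pos, pvScan, List.foldl, hnot, if_neg, if_false]
      exact ih s b c hs
    · simp only [pvDD, h, Bool.false_eq_true, if_false]
      simp only [pvScan, List.foldl]
      by_cases hfx : f x > c
      · simp only [hfx, if_pos, if_true]
        apply ih (s ++ [x]) (some x) (f x)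
        intro y hy
        rcases List.mem_append.mp hy with hy | hy
        · exact le_of_lt (lt_of_le_of_lt (hs y hy) hfx)
        · simp at hy; subst hy; exact le_rfl
      · simp only [hfx, if_neg, if_false]
        apply ih (s ++ [x]) b c
        intro y hy
        rcases List.mem_append.mp hy with hy | hy
        · exact hs y hy
        · simp at hy; subst hy; omega

theorem pvScan_best (f : String → Int) (l : List String) :
    ∀ (b : String),
    pvScan f l (some b, f b) =
      (some (l.foldl (fun best x => if f x > f best then x else best) b),
       f (l.foldl (fun best x => if f x > f best then x else best) b)) := by
  induction l with
  | nil => intro b; rfl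
  | cons x xs ih =>
    intro b
    by_cases h : f x > f b
    · simp only [pvScan, List.foldl, h, if_pos, if_true]
      exact ih x
    · simp only [pvScan, List.foldl, h, if_neg, if_false]
      exact ih b

-- ===== VERDICT (by name: the statement is the Claim_ definition above) =====
theorem prato_mas_pedido_maria_spec : Claim_equal_prato_mas_pedido_maria := by
  intro orders _ hpre
  unfold Spec_prato_mas_pedido_maria
  obtain ⟨-, o, ho, hcl⟩ := hpre
  show prato_mas_pedido_maria orders = prato_mas_pedido_maria_alt orders
  simp only [prato_mas_pedido_maria, prato_mas_pedido_maria_alt]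
  set m : List String := (orders.filter (fun o => (PySem.Dict.mk o).get? "client" == some "maria")).map
      (fun o => ((PySem.Dict.mk o).get? "order").getD "") with hm
  set f : String → Int := fun v => (m.count v : Int) with hf
  -- the maria list is nonempty
  have hmne : m ≠ [] := by
    have : o ∈ orders.filter (fun o => (PySem.Dict.mk o).get? "client" == some "maria") := by
      rw [List.mem_filter]
      exact ⟨ho, by simp [hcl]⟩
    have : ((PySem.Dict.mk o).get? "order").getD "" ∈ m := List.mem_map_of_mem this
    intro h; rw [h] at this; exact absurd this (List.not_mem_nil)
  -- A's counting loop builds the counter of m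
  have hcnt : m.foldl
      (fun d v => if d.contains v then d.insert v (d.getD v 0 + 1) else d.insert v (1 : Int))
      PySem.Dict.empty = PySem.Dict.counter m := by
    have hfun : (fun (d : PySem.Dict String Int) v =>
        if d.contains v then d.insert v (d.getD v 0 + 1) else d.insert v (1 : Int)) =
        (fun d v => d.insert v (d.getD v 0 + 1)) := by
      funext d v
      by_cases h : d.contains v
      · simp [h]
      · simp [h, PySem.Dict.getD_of_not_contains d (0 : Int) (by simpa using h)]
    rw [hfun, PySem.Dict.foldl_insert_getD_add_one_eq_counter]
  rw [hcnt]
  -- keys of the counter = ordered dedup of m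
  have hkeys : (PySem.Dict.counter m).keys = pvDD [] m := by
    rw [PySem.Dict.keys_counter]
    show List.foldl PySem.Set.add PySem.Set.empty m = pvDD [] m
    have := pvOfList_eq_dd m []
    simpa [PySem.Set.empty] using this
  rw [hkeys]
  -- the dedup is nonempty; name its head and tail
  have hddne : pvDD [] m ≠ [] := by
    obtain ⟨y, ys, hys⟩ := List.exists_cons_of_ne_nil hmne
    have hymem : y ∈ List.foldl PySem.Set.add PySem.Set.empty m := by
      have : y ∈ m := by rw [hys]; exact List.mem_cons_self
      simpa [PySem.Set.ofList, PySem.Set.empty] using (PySem.Set.mem_ofList m y).mpr this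
    intro h
    have := pvOfList_eq_dd m []
    simp only [List.nil_append] at this
    rw [show List.foldl PySem.Set.add PySem.Set.empty m = pvDD [] m from by simpa [PySem.Set.empty] using this, h] at hymem
    exact absurd hymem List.not_mem_nil
  obtain ⟨k, ks, hkks⟩ := List.exists_cons_of_ne_nil hddne
  rw [hkks]
  -- lookups in the counter are counts in m
  have hgf : (fun (best x : String) =>
      if (PySem.Dict.counter m).getD x 0 > (PySem.Dict.counter m).getD best 0 then x else best) =
      (fun best x => if f x > f best then x else best) := by
    funext best x; simp [PySem.Dict.getD_counter, hf]
  rw [hgf]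
  -- B's fold is the scan with f
  show _ = (pvScan f m (none, 0)).1.getD ""
  -- the head of the dedup occurs in m, so f k ≥ 1
  have hkm : k ∈ m := by
    have : k ∈ pvDD [] m := by rw [hkks]; exact List.mem_cons_self
    have h2 : k ∈ List.foldl PySem.Set.add PySem.Set.empty m := by
      have := pvOfList_eq_dd m []
      simp only [List.nil_append] at this
      rw [show List.foldl PySem.Set.add PySem.Set.empty m = pvDD [] m from by simpa [PySem.Set.empty] using this]
      exact this ▸ ‹k ∈ pvDD [] m›
    exact (PySem.Set.mem_ofList m k).mp (by simpa [PySem.Set.ofList, PySem.Set.empty] using h2)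
  have hfk : 0 < f k := by
    have : 1 ≤ m.count k := List.count_pos_iff.mpr hkm
    simp only [hf]; exact_mod_cast this
  -- chain the scan lemmas
  rw [pvScan_skip f m [] none 0 (by intro x hx; exact absurd hx List.not_mem_nil), hkks]
  have hstep : pvScan f (k :: ks) (none, 0) = pvScan f ks (some k, f k) := by
    simp [pvScan, List.foldl, hfk]
  rw [hstep, pvScan_best]
  rfl
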